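-- pv_equiv track=rewrite | github.com/asadwaheed1/personal_ai_employee | src/orchestrator/skills/update_dashboard.py | _update_status
-- ===== SOURCE A (Python) =====
-- def _update_status(content: str, status: str) -> str:
--     """Update the system status section"""
--     status_map = {
--         'operational': '✅ Operational',
--         'processing': '⏳ Processing',
--         'error': '❌ Error',
--         'idle': '💤 Idle'
--     }
--
--     status_text = status_map.get(status, '⚪ Unknown')
--
--     if "## System Status" in content:
--         # Replace existing status
--         lines = content.split('\n')
--         for i, line in enumerate(lines):
--             if line.startswith("## System Status"):
--                 # Find the next non-empty line
--                 for j in range(i+1, len(lines)):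
--                     if lines[j].strip() and not lines[j].startswith('#'):
--                         lines[j] = status_text
--                         break
--                 break
--         content = '\n'.join(lines)
--     else:
--         # Add status section after title
--         content = content.replace(
--             "# AI Employee Dashboard",
--             f"# AI Employee Dashboard\n\n## System Status\n{status_text}"
--         )
--
--     return content
-- ===== SOURCE B (Python) =====
-- def _qualifies(line: str) -> bool:
--     return bool(line.strip()) and not line.startswith('#')
--
--
-- def _is_header(line: str) -> bool:
--     return line.startswith("## System Status")
--
--
-- def _update_status(content: str, status: str) -> str:
--     """Update the system status section (single linear pass with two flags)"""
--     status_map = {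
--         'operational': '✅ Operational',
--         'processing': '⏳ Processing',
--         'error': '❌ Error',
--         'idle': '💤 Idle'
--     }
--     status_text = status_map.get(status, '⚪ Unknown')
--
--     if "## System Status" not in content:
--         return content.replace(
--             "# AI Employee Dashboard",
--             f"# AI Employee Dashboard\n\n## System Status\n{status_text}"
--         )
--
--     out = []
--     seen_header = False
--     replaced = False
--     for line in content.split('\n'):
--         if not replaced and seen_header and _qualifies(line):
--             out.append(status_text)
--             replaced = True
--         else:
--             out.append(line)
--             seen_header = seen_header or _is_header(line)
--     return '\n'.join(out)
-- ===== Notes on version B (the rewrite author's own statement) =====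
-- stated objective: simpler
-- what changed: A's nested phased scans (find the header line by index, then an inner index loop over range(i+1, len) to replace the next non-empty non-# line) are collapsed into one linear pass over the lines with two flags (seen_header, replaced) building the output list directly.
import Mathlib
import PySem

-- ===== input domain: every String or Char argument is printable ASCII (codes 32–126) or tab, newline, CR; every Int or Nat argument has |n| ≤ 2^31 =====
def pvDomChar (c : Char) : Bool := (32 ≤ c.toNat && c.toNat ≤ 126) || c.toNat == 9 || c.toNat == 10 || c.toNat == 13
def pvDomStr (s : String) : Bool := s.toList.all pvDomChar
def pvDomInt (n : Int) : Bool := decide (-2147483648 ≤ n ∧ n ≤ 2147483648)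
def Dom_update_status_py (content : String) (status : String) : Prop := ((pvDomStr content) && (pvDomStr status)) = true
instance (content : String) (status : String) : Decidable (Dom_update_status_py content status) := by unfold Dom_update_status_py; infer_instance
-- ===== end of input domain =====

-- B replaces A's two nested index-based scans by one linear pass with two flags (simpler decomposition, same result).

-- shared by both Pythons verbatim: the status_map lookup
def statusMapGet (status : String) : String :=
  PySem.Dict.getD (PySem.Dict.ofList
    [("operational", "✅ Operational"), ("processing", "⏳ Processing"),
     ("error", "❌ Error"), ("idle", "💤 Idle")]) status "⚪ Unknown"

-- content.split('\n'): split? is total for the literal non-empty separator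
def splitNL (s : String) : List String := (PySem.Str.split? s "\n").getD []

-- ===== PORT A =====
-- inner loop: for j in range(i+1, len(lines)): if lines[j].strip() and not lines[j].startswith('#'): lines[j] = st; break
def aInner (st : String) (lines : List String) : List Int → List String
  | [] => lines
  | j :: rest =>
      if !(PySem.Str.strip (PySem.List.pyGetD lines j "") == "")
         && !(PySem.Str.startswith (PySem.List.pyGetD lines j "") "#") then
        PySem.List.pySetD lines j st
      else aInner st lines rest

-- outer loop: for i, line in enumerate(lines): if line.startswith("## System Status"): <inner>; break
def aOuterGo (st : String) (lines : List String) : List (Int × String) → List String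
  | [] => lines
  | (i, line) :: rest =>
      if PySem.Str.startswith line "## System Status" then
        aInner st lines (PySem.List.pyRange (i + 1) (lines.length : Int) 1)
      else aOuterGo st lines rest

def update_status_py (content : String) (status : String) : String :=
  let st := statusMapGet status
  if PySem.Str.isIn "## System Status" content then
    let lines := splitNL content
    PySem.Str.join "\n" (aOuterGo st lines (PySem.List.enumerate lines 0))
  else
    PySem.Str.replace content "# AI Employee Dashboard"
      ("# AI Employee Dashboard\n\n## System Status\n" ++ st)

-- ===== PORT B =====
-- _qualifies(line): line.strip() and not line.startswith('#')
def lineQual (l : String) : Bool :=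
  !(PySem.Str.strip l == "") && !(PySem.Str.startswith l "#")

-- _is_header(line): line.startswith("## System Status")
def isHdr (l : String) : Bool := PySem.Str.startswith l "## System Status"

-- one fold step of B's loop: state = (out, seen_header, replaced)
def bStep (st : String) (s : List String × Bool × Bool) (line : String) :
    List String × Bool × Bool :=
  if !s.2.2 && s.2.1 && lineQual line then
    (s.1 ++ [st], s.2.1, true)
  else
    (s.1 ++ [line], s.2.1 || isHdr line, s.2.2)

def update_status_py_alt (content : String) (status : String) : String :=
  let st := statusMapGet status
  if !(PySem.Str.isIn "## System Status" content) then
    PySem.Str.replace content "# AI Employee Dashboard"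
      ("# AI Employee Dashboard\n\n## System Status\n" ++ st)
  else
    PySem.Str.join "\n" ((splitNL content).foldl (bStep st) ([], false, false)).1

-- ===== PRECONDITION & SPEC =====
def Spec_update_status_py (content : String) (status : String) (out : String) : Prop := out = update_status_py_alt content status
instance (content : String) (status : String) (out : String) : Decidable (Spec_update_status_py content status out) := by unfold Spec_update_status_py; infer_instance

-- ===== CLAIM (what is proved, stated in full; the proofs are below) =====
def Claim_equal_update_status_py : Prop := ∀ (content : String) (status : String), Dom_update_status_py content status → Spec_update_status_py content status (update_status_py content status)

-- ===== LEMMAS AND PROOFS =====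

-- replace the first qualifying line (spec-level helper, proofs only)
def repl (st : String) : List String → List String
  | [] => []
  | l :: rest => if lineQual l then st :: rest else l :: repl st rest

-- common characterisation of both transforms
def specFn (st : String) : List String → List String
  | [] => []
  | l :: rest => if isHdr l then l :: repl st rest else l :: specFn st rest

-- B's loop as structural recursion
def bGo (st : String) : List String → Bool → Bool → List String
  | [], _, _ => []
  | l :: rest, seen, replaced =>
      if !replaced && seen && lineQual l then st :: bGo st rest seen true
      else l :: bGo st rest (seen || isHdr l) replaced

theorem take_succ_getElem {α : Type} (l : List α) (k : Nat) (h : k < l.length) :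
    l.take (k + 1) = l.take k ++ [l[k]] := by
  rw [List.take_add_one, List.getElem?_eq_getElem h]; rfl

theorem foldl_bStep (st : String) (ls : List String) :
    ∀ (out : List String) (seen replaced : Bool),
      (ls.foldl (bStep st) (out, seen, replaced)).1 = out ++ bGo st ls seen replaced := by
  induction ls with
  | nil => intro out seen replaced; simp [bGo]
  | cons l rest ih =>
      intro out seen replaced
      rw [List.foldl_cons]
      by_cases h : (!replaced && seen && lineQual l) = true
      · rw [show bStep st (out, seen, replaced) l = (out ++ [st], seen, true) by
          simp only [bStep]; rw [if_pos h]]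
        rw [ih, bGo, if_pos h, List.append_assoc, List.singleton_append]
      · rw [show bStep st (out, seen, replaced) l = (out ++ [l], seen || isHdr l, replaced) by
          simp only [bStep]; rw [if_neg h]]
        rw [ih, bGo, if_neg h, List.append_assoc, List.singleton_append]

theorem bGo_replaced (st : String) (ls : List String) :
    ∀ seen : Bool, bGo st ls seen true = ls := by
  induction ls with
  | nil => intro seen; simp [bGo]
  | cons l rest ih => intro seen; simp [bGo, ih]

theorem bGo_seen (st : String) (ls : List String) :
    bGo st ls true false = repl st ls := by
  induction ls with
  | nil => simp [bGo, repl]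
  | cons l rest ih =>
      by_cases h : lineQual l
      · simp only [bGo, repl]
        rw [if_pos (by simp [h]), if_pos h, bGo_replaced]
      · simp only [bGo, repl]
        rw [if_neg (by simp [h]), if_neg h, Bool.true_or, ih]

theorem bGo_init (st : String) (ls : List String) :
    bGo st ls false false = specFn st ls := by
  induction ls with
  | nil => simp [bGo, specFn]
  | cons l rest ih =>
      simp only [bGo, specFn]
      rw [if_neg (by simp)]
      by_cases h : isHdr l
      · rw [if_pos h, h, Bool.false_or, bGo_seen]
      · rw [if_neg h]
        have h' : isHdr l = false := by simpa using h
        rw [h', Bool.or_false, ih]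

theorem aInner_range (st : String) (lines : List String) :
    ∀ k : Nat, k ≤ lines.length →
      aInner st lines (PySem.List.pyRange (k : Int) (lines.length : Int) 1) =
        lines.take k ++ repl st (lines.drop k) := by
  intro k hk
  induction hn : lines.length - k generalizing k with
  | zero =>
      have hk' : k = lines.length := by omega
      subst hk'
      rw [PySem.List.pyRange_one_eq_nil (le_refl _)]
      simp [aInner, repl]
  | succ m ih =>
      have hlt : k < lines.length := by omega
      rw [PySem.List.pyRange_one_cons (by exact_mod_cast hlt)]
      have hdrop : lines.drop k = lines[k] :: lines.drop (k + 1) :=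
        List.drop_eq_getElem_cons hlt
      have hget : PySem.List.pyGetD lines (k : Int) "" = lines[k] := by
        rw [PySem.List.pyGetD_natCast]; exact List.getD_eq_getElem _ _ hlt
      by_cases hq : lineQual lines[k] = true
      · rw [show aInner st lines ((k : Int) :: PySem.List.pyRange ((k : Int) + 1) (lines.length : Int) 1)
              = PySem.List.pySetD lines (k : Int) st by
          simp only [aInner, hget]; rw [if_pos (by simpa [lineQual] using hq)]]
        rw [PySem.List.pySetD_natCast, List.set_eq_take_append_cons_drop, if_pos hlt]
        rw [hdrop, repl, if_pos hq]
      · rw [show aInner st lines ((k : Int) :: PySem.List.pyRange ((k : Int) + 1) (lines.length : Int) 1)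
              = aInner st lines (PySem.List.pyRange ((k : Int) + 1) (lines.length : Int) 1) by
          simp only [aInner, hget]; rw [if_neg (by simpa [lineQual] using hq)]]
        have hcast : ((k : Int) + 1) = ((k + 1 : Nat) : Int) := by push_cast; ring
        rw [hcast, ih (k + 1) (by omega) (by omega)]
        rw [hdrop, repl, if_neg hq, take_succ_getElem lines k hlt, List.append_assoc,
          List.singleton_append]

theorem aOuterGo_enum (st : String) (lines : List String) :
    ∀ k : Nat, k ≤ lines.length →
      aOuterGo st lines (PySem.List.enumerate (lines.drop k) (k : Int)) =
        lines.take k ++ specFn st (lines.drop k) := by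
  intro k hk
  induction hn : lines.length - k generalizing k with
  | zero =>
      have hk' : k = lines.length := by omega
      subst hk'
      rw [List.drop_length, PySem.List.enumerate_nil]
      simp [aOuterGo, specFn]
  | succ m ih =>
      have hlt : k < lines.length := by omega
      have hdrop : lines.drop k = lines[k] :: lines.drop (k + 1) :=
        List.drop_eq_getElem_cons hlt
      rw [hdrop, PySem.List.enumerate_cons]
      have hcast : ((k : Int) + 1) = ((k + 1 : Nat) : Int) := by push_cast; ring
      by_cases hh : PySem.Str.startswith lines[k] "## System Status" = true
      · rw [show aOuterGo st lines (((k : Int), lines[k]) :: PySem.List.enumerate (lines.drop (k + 1)) ((k : Int) + 1))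
              = aInner st lines (PySem.List.pyRange ((k : Int) + 1) (lines.length : Int) 1) by
          simp only [aOuterGo]; rw [if_pos hh]]
        rw [hcast, aInner_range st lines (k + 1) (by omega)]
        rw [specFn, if_pos (show isHdr lines[k] = true from hh), take_succ_getElem lines k hlt, List.append_assoc,
          List.singleton_append]
      · rw [show aOuterGo st lines (((k : Int), lines[k]) :: PySem.List.enumerate (lines.drop (k + 1)) ((k : Int) + 1))
              = aOuterGo st lines (PySem.List.enumerate (lines.drop (k + 1)) ((k : Int) + 1)) by
          simp only [aOuterGo]; rw [if_neg hh]]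
        rw [hcast, ih (k + 1) (by omega) (by omega)]
        rw [specFn, if_neg (show ¬ isHdr lines[k] = true from hh), take_succ_getElem lines k hlt, List.append_assoc,
          List.singleton_append]

-- ===== VERDICT (by name: the statement is the Claim_ definition above) =====
theorem update_status_py_spec : Claim_equal_update_status_py := by
  intro content status _
  unfold Spec_update_status_py update_status_py update_status_py_alt
  by_cases h : PySem.Str.isIn "## System Status" content = true
  · rw [if_pos h, if_neg (by rw [h]; simp)]
    rw [foldl_bStep, List.nil_append, bGo_init]
    refine congrArg (PySem.Str.join "\n") ?_
    have := aOuterGo_enum (statusMapGet status) (splitNL content) 0 (by omega)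
    simpa only [List.drop_zero, List.take_zero, List.nil_append, Nat.cast_zero] using this
  · have h' : PySem.Str.isIn "## System Status" content = false := by
      exact Bool.eq_false_iff.mpr h
    rw [if_neg (by rw [h']; simp), if_pos (by rw [h']; rfl)]
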